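-- pv_equiv track=rewrite | github.com/azengard/oop | binary_adt/binary.py | subtractor
-- ===== SOURCE A (Python) =====
-- from itertools import zip_longest
--
-- def fulladder(a, b, cin):
--     sum_ = (a ^ b) ^ cin
--     cout = a & b | cin & (a ^ b)
--     return sum_, cout
--
-- def subtractor(n, m):
--     acc = 0
--     cout = inverter = 1
--
--     for i, (a, b) in enumerate(zip_longest(n, m, fillvalue=0)):
--         b ^= inverter
--         sum_, cout = fulladder(a, b, cout)
--
--         acc |= sum_ << i
--
--     return acc
-- ===== SOURCE B (Python) =====
-- from itertools import zip_longest
--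
-- def subtractor(n, m):
--     pairs = list(zip_longest(n, m, fillvalue=0))
--     # phase 1: propagate the borrow/carry chain, materializing every carry-in
--     cins = []
--     cin = 1
--     for a, b in pairs:
--         cins.append(cin)
--         b ^= 1
--         cin = a & b | cin & (a ^ b)
--     # phase 2: assemble the result from the top bit down (Horner-style)
--     acc = 0
--     for (a, b), cin in reversed(list(zip(pairs, cins))):
--         b ^= 1
--         acc = ((a ^ b) ^ cin) | acc << 1
--     return acc
-- ===== Notes on version B (the rewrite author's own statement) =====
-- stated objective: alternative
-- what changed: B replaces A's single fused ripple loop (carry and accumulator threaded together, absolute positional shifts acc |= s << i) with a two-phase algorithm: a forward pass that materializes the whole carry-in sequence, then a reverse Horner-style pass assembling the result as acc = s | acc << 1 with relative shifts.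
import Mathlib
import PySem

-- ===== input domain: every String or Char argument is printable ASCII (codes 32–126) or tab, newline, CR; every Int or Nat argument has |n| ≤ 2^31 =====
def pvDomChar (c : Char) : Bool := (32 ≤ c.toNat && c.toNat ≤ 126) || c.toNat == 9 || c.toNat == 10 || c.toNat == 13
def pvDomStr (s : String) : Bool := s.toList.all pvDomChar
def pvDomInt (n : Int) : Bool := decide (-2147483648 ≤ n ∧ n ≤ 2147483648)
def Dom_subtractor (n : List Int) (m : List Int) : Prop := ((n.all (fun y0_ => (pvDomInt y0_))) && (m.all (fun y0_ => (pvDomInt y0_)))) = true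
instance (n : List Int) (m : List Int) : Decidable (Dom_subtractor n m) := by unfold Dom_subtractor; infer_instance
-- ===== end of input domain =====

-- B replaces A's single fused ripple loop (carry and accumulator threaded together, absolute
-- positional shifts) by two phases: a forward pass materializing the carry chain, then a reverse
-- Horner-style pass assembling the result as acc = s | acc << 1 (alternative decomposition, same cost).

-- ===== PORT A =====
-- itertools.zip_longest(n, m, fillvalue=0), shared helper (both Pythons call zip_longest)
def zipLongest : List Int → List Int → List (Int × Int)
  | [], [] => []
  | a :: n, [] => (a, 0) :: zipLongest n []
  | [], b :: m => (0, b) :: zipLongest [] m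
  | a :: n, b :: m => (a, b) :: zipLongest n m

def fulladder (a : Int) (b : Int) (cin : Int) : Int × Int :=
  (PySem.Int.bxor (PySem.Int.bxor a b) cin,
   PySem.Int.bor (PySem.Int.band a b) (PySem.Int.band cin (PySem.Int.bxor a b)))

-- the loop body of A: state (acc, cout); inverter stays 1 throughout the loop
def subtractorStep (st : Int × Int) (p : Int × (Int × Int)) : Int × Int :=
  let b := PySem.Int.bxor p.2.2 1
  let sc := fulladder p.2.1 b st.2
  (PySem.Int.bor st.1 (sc.1 <<< p.1.toNat), sc.2)

def subtractor (n : List Int) (m : List Int) : Int :=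
  ((PySem.List.enumerate (zipLongest n m)).foldl subtractorStep (0, 1)).1

-- ===== PORT B =====
-- phase 1 loop body: state (cins, cin)
def subtractorAltCarryStep (st : List Int × Int) (p : Int × Int) : List Int × Int :=
  let b := PySem.Int.bxor p.2 1
  (st.1 ++ [st.2],
   PySem.Int.bor (PySem.Int.band p.1 b) (PySem.Int.band st.2 (PySem.Int.bxor p.1 b)))

-- phase 2 loop body: acc = ((a ^ b) ^ cin) | acc << 1
def subtractorAltAsmStep (acc : Int) (pc : (Int × Int) × Int) : Int :=
  let b := PySem.Int.bxor pc.1.2 1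
  PySem.Int.bor (PySem.Int.bxor (PySem.Int.bxor pc.1.1 b) pc.2) (acc <<< (1 : Nat))

def subtractor_alt (n : List Int) (m : List Int) : Int :=
  let pairs := zipLongest n m
  let cins := (pairs.foldl subtractorAltCarryStep ([], 1)).1
  ((pairs.zip cins).reverse).foldl subtractorAltAsmStep 0

-- ===== PRECONDITION & SPEC =====
def Spec_subtractor (n : List Int) (m : List Int) (out : Int) : Prop := out = subtractor_alt n m
instance (n : List Int) (m : List Int) (out : Int) : Decidable (Spec_subtractor n m out) := by
  unfold Spec_subtractor; infer_instance

-- ===== CLAIM (what is proved, stated in full; the proofs are below) =====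
def Claim_equal_subtractor : Prop := ∀ (n : List Int) (m : List Int), Dom_subtractor n m → Spec_subtractor n m (subtractor n m)

-- ===== LEMMAS AND PROOFS =====

-- u - (u &&& v) is the bitwise set difference (Nat)
theorem ldiffN_eq (u : Nat) : ∀ v : Nat, u - (u &&& v) = u.ldiff v := by
  induction u using Nat.strong_induction_on with
  | _ u ih =>
    intro v
    rcases Nat.eq_zero_or_pos u with rfl | hu
    · have h0 : (0 : Nat).ldiff v = 0 :=
        Nat.eq_of_testBit_eq fun k => by simp [Nat.testBit_ldiff]
      simp [h0]
    · have hu2 : u >>> 1 < u := by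
        have : u >>> 1 = u / 2 := Nat.shiftRight_one u
        omega
      have hdu := Nat.bit_testBit_zero_shiftRight_one u
      have hdv := Nat.bit_testBit_zero_shiftRight_one v
      have hland : u &&& v = Nat.bit (u.testBit 0 && v.testBit 0) ((u >>> 1) &&& (v >>> 1)) := by
        conv_lhs => rw [← hdu, ← hdv]
        exact Nat.land_bit _ _ _ _
      have hld : u.ldiff v = Nat.bit (u.testBit 0 && !v.testBit 0) ((u >>> 1).ldiff (v >>> 1)) := by
        conv_lhs => rw [← hdu, ← hdv]
        exact Nat.ldiff_bit _ _ _ _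
      have hle : (u >>> 1) &&& (v >>> 1) ≤ u >>> 1 := Nat.and_le_left
      have ihv := ih _ hu2 (v >>> 1)
      rw [hland, hld, Nat.bit_val, Nat.bit_val]
      rw [Nat.bit_val] at hdu
      cases hb : u.testBit 0 <;> cases hb2 : v.testBit 0 <;>
        simp only [hb, Bool.and_self, Bool.and_true, Bool.and_false, Bool.not_true,
          Bool.not_false, Bool.toNat_true, Bool.toNat_false] at hdu ⊢ <;>
        omega

theorem ldiff_ldiff_comm (u v w : Nat) : (u.ldiff v).ldiff w = (u.ldiff w).ldiff v :=
  Nat.eq_of_testBit_eq fun k => by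
    simp only [Nat.testBit_ldiff]
    cases u.testBit k <;> cases v.testBit k <;> cases w.testBit k <;> rfl

-- evaluation of PySem.Int.bor on each sign pattern, via Nat.ldiff
theorem bor_pp {a b : Int} (ha : 0 ≤ a) (hb : 0 ≤ b) :
    PySem.Int.bor a b = ((a.toNat ||| b.toNat : Nat) : Int) := by
  simp [PySem.Int.bor, ha, hb]

theorem bor_pn {a b : Int} (ha : 0 ≤ a) (hb : b < 0) :
    PySem.Int.bor a b = -(((-b - 1).toNat.ldiff a.toNat : Nat) : Int) - 1 := by
  rw [← ldiffN_eq]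
  simp only [PySem.Int.bor, if_pos ha, if_neg (by omega : ¬ 0 ≤ b)]

theorem bor_np {a b : Int} (ha : a < 0) (hb : 0 ≤ b) :
    PySem.Int.bor a b = -(((-a - 1).toNat.ldiff b.toNat : Nat) : Int) - 1 := by
  rw [← ldiffN_eq]
  simp only [PySem.Int.bor, if_neg (by omega : ¬ 0 ≤ a), if_pos hb]

theorem bor_nn {a b : Int} (ha : a < 0) (hb : b < 0) :
    PySem.Int.bor a b = -((((-a - 1).toNat &&& (-b - 1).toNat : Nat)) : Int) - 1 := by
  simp [PySem.Int.bor, if_neg (by omega : ¬ 0 ≤ a), if_neg (by omega : ¬ 0 ≤ b)]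

theorem borDouble (x y : Int) : PySem.Int.bor (2 * x) (2 * y) = 2 * PySem.Int.bor x y := by
  rcases le_or_gt 0 x with hx | hx <;> rcases le_or_gt 0 y with hy | hy
  · rw [bor_pp hx hy, bor_pp (by omega) (by omega)]
    have h1 : (2 * x).toNat = 2 * x.toNat := by omega
    have h2 : (2 * y).toNat = 2 * y.toNat := by omega
    have h3 : (2 * x.toNat) ||| (2 * y.toNat) = 2 * (x.toNat ||| y.toNat) := by
      have := Nat.lor_bit false x.toNat false y.toNat
      simpa [Nat.bit_val] using this
    rw [h1, h2, h3]; push_cast; ring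
  · rw [bor_pn hx hy, bor_pn (by omega) (by omega)]
    have h1 : (-(2 * y) - 1).toNat = 2 * (-y - 1).toNat + 1 := by omega
    have h2 : (2 * x).toNat = 2 * x.toNat := by omega
    have h3 : (2 * (-y - 1).toNat + 1).ldiff (2 * x.toNat) = 2 * ((-y - 1).toNat.ldiff x.toNat) + 1 := by
      have := Nat.ldiff_bit true (-y - 1).toNat false x.toNat
      simpa [Nat.bit_val] using this
    rw [h1, h2, h3]; push_cast; ring
  · rw [bor_np hx hy, bor_np (by omega) (by omega)]
    have h1 : (-(2 * x) - 1).toNat = 2 * (-x - 1).toNat + 1 := by omega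
    have h2 : (2 * y).toNat = 2 * y.toNat := by omega
    have h3 : (2 * (-x - 1).toNat + 1).ldiff (2 * y.toNat) = 2 * ((-x - 1).toNat.ldiff y.toNat) + 1 := by
      have := Nat.ldiff_bit true (-x - 1).toNat false y.toNat
      simpa [Nat.bit_val] using this
    rw [h1, h2, h3]; push_cast; ring
  · rw [bor_nn hx hy, bor_nn (by omega) (by omega)]
    have h1 : (-(2 * x) - 1).toNat = 2 * (-x - 1).toNat + 1 := by omega
    have h2 : (-(2 * y) - 1).toNat = 2 * (-y - 1).toNat + 1 := by omega
    have h3 : (2 * (-x - 1).toNat + 1) &&& (2 * (-y - 1).toNat + 1)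
        = 2 * ((-x - 1).toNat &&& (-y - 1).toNat) + 1 := by
      have := Nat.land_bit true (-x - 1).toNat true (-y - 1).toNat
      simpa [Nat.bit_val] using this
    rw [h1, h2, h3]; push_cast; ring

theorem ldiff_lor (r p q : Nat) : r.ldiff (p ||| q) = (r.ldiff q).ldiff p :=
  Nat.eq_of_testBit_eq fun k => by
    simp only [Nat.testBit_ldiff, Nat.testBit_lor]
    cases r.testBit k <;> cases p.testBit k <;> cases q.testBit k <;> rfl

theorem ldiff_land_left (u p w : Nat) : (u.ldiff p) &&& w = (u &&& w).ldiff p :=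
  Nat.eq_of_testBit_eq fun k => by
    simp only [Nat.testBit_ldiff, Nat.testBit_land]
    cases u.testBit k <;> cases p.testBit k <;> cases w.testBit k <;> rfl

theorem ldiff_land_right (u q r : Nat) : (u.ldiff q) &&& r = u &&& (r.ldiff q) :=
  Nat.eq_of_testBit_eq fun k => by
    simp only [Nat.testBit_ldiff, Nat.testBit_land]
    cases u.testBit k <;> cases q.testBit k <;> cases r.testBit k <;> rfl

theorem land_ldiff (u v r : Nat) : (u &&& v).ldiff r = u &&& (v.ldiff r) :=
  Nat.eq_of_testBit_eq fun k => by
    simp only [Nat.testBit_ldiff, Nat.testBit_land]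
    cases u.testBit k <;> cases v.testBit k <;> cases r.testBit k <;> rfl

theorem borAssoc (a b c : Int) :
    PySem.Int.bor (PySem.Int.bor a b) c = PySem.Int.bor a (PySem.Int.bor b c) := by
  rcases le_or_gt 0 a with ha | ha <;> rcases le_or_gt 0 b with hb | hb <;>
    rcases le_or_gt 0 c with hc | hc
  · -- + + +
    rw [bor_pp ha hb, bor_pp (by positivity) hc, bor_pp hb hc, bor_pp ha (by positivity)]
    simp only [Int.toNat_natCast]
    rw [Nat.lor_assoc]
  · -- + + -
    rw [bor_pp ha hb, bor_pn (by positivity) hc, bor_pn hb hc, bor_pn ha (by omega)]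
    simp only [Int.toNat_natCast]
    have h4 : (-(-((((-c - 1).toNat.ldiff b.toNat : Nat)) : Int) - 1) - 1).toNat
        = (-c - 1).toNat.ldiff b.toNat := by omega
    rw [h4, ldiff_lor]
  · -- + - +
    rw [bor_pn ha hb, bor_np (by omega) hc, bor_np hb hc, bor_pn ha (by omega)]
    have h3 : (-(-((((-b - 1).toNat.ldiff a.toNat : Nat)) : Int) - 1) - 1).toNat
        = (-b - 1).toNat.ldiff a.toNat := by omega
    have h4 : (-(-((((-b - 1).toNat.ldiff c.toNat : Nat)) : Int) - 1) - 1).toNat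
        = (-b - 1).toNat.ldiff c.toNat := by omega
    rw [h3, h4, ldiff_ldiff_comm]
  · -- + - -
    rw [bor_pn ha hb, bor_nn hb hc, bor_nn (by omega) hc, bor_pn ha (by omega)]
    have h3 : (-(-((((-b - 1).toNat.ldiff a.toNat : Nat)) : Int) - 1) - 1).toNat
        = (-b - 1).toNat.ldiff a.toNat := by omega
    have h4 : (-(-(((((-b - 1).toNat &&& (-c - 1).toNat : Nat)) : Int)) - 1) - 1).toNat
        = (-b - 1).toNat &&& (-c - 1).toNat := by omega
    rw [h3, h4, ldiff_land_left]
  · -- - + +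
    rw [bor_np ha hb, bor_np (by omega) hc, bor_pp hb hc, bor_np ha (by positivity)]
    simp only [Int.toNat_natCast]
    have h3 : (-(-((((-a - 1).toNat.ldiff b.toNat : Nat)) : Int) - 1) - 1).toNat
        = (-a - 1).toNat.ldiff b.toNat := by omega
    rw [h3, ldiff_lor, ldiff_ldiff_comm]
  · -- - + -
    rw [bor_np ha hb, bor_nn (by omega) hc, bor_pn hb hc, bor_nn ha (by omega)]
    have h3 : (-(-((((-a - 1).toNat.ldiff b.toNat : Nat)) : Int) - 1) - 1).toNat
        = (-a - 1).toNat.ldiff b.toNat := by omega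
    have h4 : (-(-((((-c - 1).toNat.ldiff b.toNat : Nat)) : Int) - 1) - 1).toNat
        = (-c - 1).toNat.ldiff b.toNat := by omega
    rw [h3, h4, ldiff_land_right]
  · -- - - +
    rw [bor_nn ha hb, bor_np (by omega) hc, bor_np hb hc, bor_nn ha (by omega)]
    have h3 : (-(-(((((-a - 1).toNat &&& (-b - 1).toNat : Nat)) : Int)) - 1) - 1).toNat
        = (-a - 1).toNat &&& (-b - 1).toNat := by omega
    have h4 : (-(-((((-b - 1).toNat.ldiff c.toNat : Nat)) : Int) - 1) - 1).toNat
        = (-b - 1).toNat.ldiff c.toNat := by omega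
    rw [h3, h4, land_ldiff]
  · -- - - -
    rw [bor_nn ha hb, bor_nn (by omega) hc, bor_nn hb hc, bor_nn ha (by omega)]
    have h3 : (-(-(((((-a - 1).toNat &&& (-b - 1).toNat : Nat)) : Int)) - 1) - 1).toNat
        = (-a - 1).toNat &&& (-b - 1).toNat := by omega
    have h4 : (-(-(((((-b - 1).toNat &&& (-c - 1).toNat : Nat)) : Int)) - 1) - 1).toNat
        = (-b - 1).toNat &&& (-c - 1).toNat := by omega
    rw [h3, h4, Nat.land_assoc]

theorem zero_bor (x : Int) : PySem.Int.bor 0 x = x := by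
  rw [PySem.Int.bor_comm, PySem.Int.bor_zero]

theorem borShift : ∀ (k : Nat) (x y : Int),
    PySem.Int.bor x y <<< k = PySem.Int.bor (x <<< k) (y <<< k)
  | 0, x, y => by simp [Int.shiftLeft_eq]
  | k + 1, x, y => by
      have h1 : PySem.Int.bor x y <<< (k + 1) = (2 * PySem.Int.bor x y) <<< k := by
        simp only [Int.shiftLeft_eq, pow_succ]; ring
      rw [h1, ← borDouble, borShift k]
      congr 1 <;> · simp only [Int.shiftLeft_eq, pow_succ]; ring

theorem shift_shift (g : Int) (i : Nat) : (g <<< (1 : Nat)) <<< i = g <<< (i + 1) := by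
  rw [Int.shiftLeft_eq, Int.shiftLeft_eq, Int.shiftLeft_eq, pow_succ]
  ring

-- the nested (relative-shift) description of the ripple result, shared bridge for both ports
def goL : List (Int × Int) → Int → Int
  | [], _ => 0
  | p :: t, c =>
      PySem.Int.bor (fulladder p.1 (PySem.Int.bxor p.2 1) c).1
        (goL t (fulladder p.1 (PySem.Int.bxor p.2 1) c).2 <<< (1 : Nat))

-- the carry-in sequence B's first phase materializes
def cinsL : List (Int × Int) → Int → List Int
  | [], _ => []
  | p :: t, c => c :: cinsL t (fulladder p.1 (PySem.Int.bxor p.2 1) c).2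

theorem mainA (l : List (Int × Int)) :
    ∀ (i : Nat) (acc c : Int),
    ((PySem.List.enumerate l (i : Int)).foldl subtractorStep (acc, c)).1
      = PySem.Int.bor acc (goL l c <<< i) := by
  induction l with
  | nil =>
      intro i acc c
      simp [PySem.List.enumerate_nil, goL, Int.shiftLeft_eq, PySem.Int.bor_zero]
  | cons p t ih =>
      intro i acc c
      have hstep : subtractorStep (acc, c) ((i : Int), p)
          = (PySem.Int.bor acc ((fulladder p.1 (PySem.Int.bxor p.2 1) c).1 <<< i),
             (fulladder p.1 (PySem.Int.bxor p.2 1) c).2) := rfl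
      have hib : ((i : Int) + 1) = ((i + 1 : Nat) : Int) := by push_cast; ring
      rw [PySem.List.enumerate_cons, List.foldl_cons, hstep, hib, ih (i + 1)]
      show _ = PySem.Int.bor acc
        (PySem.Int.bor (fulladder p.1 (PySem.Int.bxor p.2 1) c).1
          (goL t (fulladder p.1 (PySem.Int.bxor p.2 1) c).2 <<< (1 : Nat)) <<< i)
      rw [borShift, shift_shift, borAssoc]

theorem carryPhase (l : List (Int × Int)) :
    ∀ (xs : List Int) (c : Int),
    (l.foldl subtractorAltCarryStep (xs, c)).1 = xs ++ cinsL l c := by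
  induction l with
  | nil => intro xs c; simp [cinsL]
  | cons p t ih =>
      intro xs c
      rw [List.foldl_cons]
      show (t.foldl subtractorAltCarryStep
        (xs ++ [c], (fulladder p.1 (PySem.Int.bxor p.2 1) c).2)).1 = _
      rw [ih]
      simp [cinsL]

theorem asmPhase (l : List (Int × Int)) :
    ∀ c : Int, ((l.zip (cinsL l c)).reverse).foldl subtractorAltAsmStep 0 = goL l c := by
  induction l with
  | nil => intro c; simp [cinsL, goL]
  | cons p t ih =>
      intro c
      rw [List.foldl_reverse]
      show List.foldr (fun x y => subtractorAltAsmStep y x) 0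
        ((p, c) :: t.zip (cinsL t (fulladder p.1 (PySem.Int.bxor p.2 1) c).2)) = _
      rw [List.foldr_cons, ← List.foldl_reverse, ih]
      rfl

-- ===== VERDICT (by name: the statement is the Claim_ definition above) =====
theorem subtractor_spec : Claim_equal_subtractor := by
  unfold Claim_equal_subtractor
  intro n m _
  unfold Spec_subtractor
  have hA : subtractor n m = goL (zipLongest n m) 1 := by
    show ((PySem.List.enumerate (zipLongest n m) ((0 : Nat) : Int)).foldl
      subtractorStep (0, 1)).1 = _
    rw [mainA, zero_bor]
    simp [Int.shiftLeft_eq]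
  have hB : subtractor_alt n m = goL (zipLongest n m) 1 := by
    show (((zipLongest n m).zip
      ((zipLongest n m).foldl subtractorAltCarryStep ([], 1)).1).reverse).foldl
        subtractorAltAsmStep 0 = _
    rw [carryPhase, List.nil_append, asmPhase]
  rw [hA, hB]
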